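-- pv_equiv track=rewrite | github.com/humac/soccer360 | src/watcher.py | _normalize_fingerprint
-- ===== SOURCE A (Python) =====
-- from typing import Mapping
--
-- def _normalize_fingerprint(
--     fingerprint: Mapping[str, object] | None,
-- ) -> dict[str, int]:
--     """Normalize fingerprint fields for stable comparisons/storage."""
--     if not isinstance(fingerprint, Mapping):
--         return {}
--
--     normalized: dict[str, int] = {}
--     for key in ("size", "mtime_ns"):
--         value = fingerprint.get(key)
--         if not isinstance(value, int) or value < 0:
--             return {}
--         normalized[key] = int(value)
--
--     ctime_ns = fingerprint.get("ctime_ns")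
--     if isinstance(ctime_ns, int) and ctime_ns > 0:
--         normalized["ctime_ns"] = int(ctime_ns)
--
--     # Some network filesystems report unstable/placeholder inode/device IDs.
--     ino = fingerprint.get("ino")
--     if isinstance(ino, int) and ino > 0:
--         normalized["ino"] = int(ino)
--
--     dev = fingerprint.get("dev")
--     if isinstance(dev, int) and dev > 0:
--         normalized["dev"] = int(dev)
--
--     return normalized
-- ===== SOURCE B (Python) =====
-- from typing import Mapping
--
-- _MIN = {"size": 0, "mtime_ns": 0, "ctime_ns": 1, "ino": 1, "dev": 1}
-- _REQUIRED = ("size", "mtime_ns")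
--
--
-- def _normalize_fingerprint(
--     fingerprint: Mapping[str, object] | None,
-- ) -> dict[str, int]:
--     """Normalize fingerprint fields: filter the input's items, check, emit."""
--     if not isinstance(fingerprint, Mapping):
--         return {}
--     # Stage 1: one scan over the INPUT's items, keeping acceptable fields.
--     accepted = {
--         key: int(value)
--         for key, value in fingerprint.items()
--         if key in _MIN and isinstance(value, int) and value >= _MIN[key]
--     }
--     # Stage 2: required fields must have survived the filter.
--     if any(key not in accepted for key in _REQUIRED):
--         return {}
--     # Stage 3: emit in canonical field order.
--     return {key: accepted[key] for key in _MIN if key in accepted}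
-- ===== Notes on version B (the rewrite author's own statement) =====
-- stated objective: alternative
-- what changed: Instead of fetching each of five keys with interleaved validation and early returns, B makes one filtering scan over the input's items into an accepted dict, then a presence check of the required keys, then a final emission pass in canonical field order.
import Mathlib
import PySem

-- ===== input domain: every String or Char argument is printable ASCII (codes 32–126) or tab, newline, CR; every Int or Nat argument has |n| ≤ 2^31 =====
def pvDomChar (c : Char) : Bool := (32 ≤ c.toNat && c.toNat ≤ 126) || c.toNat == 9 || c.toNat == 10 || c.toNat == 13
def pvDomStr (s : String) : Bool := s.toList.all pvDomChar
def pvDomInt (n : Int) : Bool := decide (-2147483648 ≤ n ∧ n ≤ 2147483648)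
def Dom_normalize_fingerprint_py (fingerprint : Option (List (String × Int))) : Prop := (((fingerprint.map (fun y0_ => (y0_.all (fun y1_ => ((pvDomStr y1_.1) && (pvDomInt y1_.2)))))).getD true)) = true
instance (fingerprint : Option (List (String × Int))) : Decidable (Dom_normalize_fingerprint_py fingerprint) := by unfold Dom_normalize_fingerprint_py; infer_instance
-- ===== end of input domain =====

-- B reworks the control flow: one filtering scan over the input's items, then a required-key
-- presence check, then emission in canonical order (objective: alternative decomposition).

-- ===== PORT A =====
-- Port of A: loop over the two required keys with early return, then three separate
-- optional-field checks, each built by per-key lookup.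
def normalize_fingerprint_py (fingerprint : Option (List (String × Int))) : List (String × Int) :=
  match fingerprint with
  | none => []
  | some l =>
    let d := PySem.Dict.ofList l
    let req : Option (PySem.Dict String Int) :=
      ["size", "mtime_ns"].foldl (fun acc key =>
        match acc with
        | none => none
        | some n =>
          match d.get? key with
          | none => none
          | some v => if v < 0 then none else some (n.insert key v)) (some PySem.Dict.empty)
    match req with
    | none => []
    | some n0 =>
      let n1 :=
        match d.get? "ctime_ns" with
        | some v => if v > 0 then n0.insert "ctime_ns" v else n0
        | none => n0
      let n2 :=
        match d.get? "ino" with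
        | some v => if v > 0 then n1.insert "ino" v else n1
        | none => n1
      let n3 :=
        match d.get? "dev" with
        | some v => if v > 0 then n2.insert "dev" v else n2
        | none => n2
      n3.items

-- ===== PORT B =====
-- _MIN : module constant of Source B
def pvMinTable : PySem.Dict String Int :=
  PySem.Dict.ofList [("size", 0), ("mtime_ns", 0), ("ctime_ns", 1), ("ino", 1), ("dev", 1)]

-- the comprehension's filter: 'key in _MIN and isinstance(value, int) and value >= _MIN[key]'
def pvAccept (kv : String × Int) : Bool :=
  match pvMinTable.get? kv.1 with
  | some lo => decide (lo ≤ kv.2)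
  | none => false

def normalize_fingerprint_py_alt (fingerprint : Option (List (String × Int))) : List (String × Int) :=
  match fingerprint with
  | none => []
  | some l =>
    let d := PySem.Dict.ofList l
    -- Stage 1: one scan over the input's items, keeping acceptable fields.
    let accepted : PySem.Dict String Int :=
      d.items.foldl (fun a kv => if pvAccept kv then a.insert kv.1 kv.2 else a)
        PySem.Dict.empty
    -- Stage 2: required fields must have survived the filter.
    if ["size", "mtime_ns"].any (fun k => !(accepted.contains k)) then []
    else
      -- Stage 3: emit in canonical field order (accepted[key] is guarded by the contains check).
      (pvMinTable.keys.foldl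
        (fun out k => if accepted.contains k then out.insert k (accepted.getD k 0) else out)
        PySem.Dict.empty).items

-- ===== PRECONDITION & SPEC =====
def Spec_normalize_fingerprint_py (fingerprint : Option (List (String × Int))) (out : List (String × Int)) : Prop := out = normalize_fingerprint_py_alt fingerprint
instance (fingerprint : Option (List (String × Int))) (out : List (String × Int)) : Decidable (Spec_normalize_fingerprint_py fingerprint out) := by unfold Spec_normalize_fingerprint_py; infer_instance

-- ===== CLAIM (what is proved, stated in full; the proofs are below) =====
def Claim_equal_normalize_fingerprint_py : Prop := ∀ (fingerprint : Option (List (String × Int))), Dom_normalize_fingerprint_py fingerprint → Spec_normalize_fingerprint_py fingerprint (normalize_fingerprint_py fingerprint)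

-- ===== LEMMAS AND PROOFS =====

-- pvMinTable and pvAccept on the five literal keys, computed.
theorem pv_keys_eq : pvMinTable.keys = ["size", "mtime_ns", "ctime_ns", "ino", "dev"] := rfl
theorem pv_accept_size (v : Int) : pvAccept ("size", v) = decide (0 ≤ v) := rfl
theorem pv_accept_mtime (v : Int) : pvAccept ("mtime_ns", v) = decide (0 ≤ v) := rfl
theorem pv_accept_ctime (v : Int) : pvAccept ("ctime_ns", v) = decide (1 ≤ v) := rfl
theorem pv_accept_ino (v : Int) : pvAccept ("ino", v) = decide (1 ≤ v) := rfl
theorem pv_accept_dev (v : Int) : pvAccept ("dev", v) = decide (1 ≤ v) := rfl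

-- In a pair list with distinct keys, find? on a key returns the member with that key.
theorem pv_find_of_mem {l : List (String × Int)} {k : String} {v : Int}
    (hnd : (l.map Prod.fst).Nodup) (h : (k, v) ∈ l) :
    l.find? (fun kv => kv.1 == k) = some (k, v) := by
  induction l with
  | nil => cases h
  | cons kv rest ih =>
    simp only [List.map_cons, List.nodup_cons] at hnd
    rcases List.mem_cons.mp h with h0 | h0
    · subst h0
      rw [List.find?_cons_of_pos (by simp)]
    · have hne : kv.1 ≠ k := fun he =>
        hnd.1 (he ▸ List.mem_map.mpr ⟨(k, v), h0, rfl⟩)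
      rw [List.find?_cons_of_neg (by simp [hne])]
      exact ih hnd.2 h0

-- The filtering fold's lookup, characterised by find? on the scanned list.
theorem pv_fold_get (l : List (String × Int)) (acc : PySem.Dict String Int) (k : String)
    (hnd : (l.map Prod.fst).Nodup) :
    (l.foldl (fun a kv => if pvAccept kv then a.insert kv.1 kv.2 else a) acc).get? k
      = match l.find? (fun kv => kv.1 == k) with
        | some kv => if pvAccept kv then some kv.2 else acc.get? k
        | none => acc.get? k := by
  induction l generalizing acc with
  | nil => simp
  | cons kv rest ih =>
    simp only [List.map_cons, List.nodup_cons] at hnd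
    simp only [List.foldl_cons]
    by_cases hk : kv.1 = k
    · have hrest : rest.find? (fun kv => kv.1 == k) = none := by
        apply List.find?_eq_none.mpr
        intro x hx hb
        have hx1 : x.1 = k := by simpa using hb
        exact hnd.1 (by rw [hk, ← hx1]; exact List.mem_map.mpr ⟨x, hx, rfl⟩)
      rw [ih _ hnd.2, hrest, List.find?_cons_of_pos (by simp [hk])]
      by_cases ha : pvAccept kv = true
      · subst hk; simp [ha, PySem.Dict.get?_insert_self]
      · simp [ha]
    · have hrw : (if pvAccept kv then acc.insert kv.1 kv.2 else acc).get? k = acc.get? k := by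
        by_cases ha : pvAccept kv = true
        · simp [ha, PySem.Dict.get?_insert_of_ne _ _ (fun h => hk h.symm)]
        · simp [ha]
      rw [ih _ hnd.2, hrw, List.find?_cons_of_neg (by simp [hk])]

-- The accepted dict's lookup in terms of the source dict's lookup.
theorem pv_acc_get (l : List (String × Int)) (k : String) :
    ((PySem.Dict.ofList l).items.foldl
        (fun a kv => if pvAccept kv then a.insert kv.1 kv.2 else a)
        PySem.Dict.empty).get? k
      = ((PySem.Dict.ofList l).get? k).bind
          (fun v => if pvAccept (k, v) then some v else none) := by
  have hnd : ((PySem.Dict.ofList l).items.map Prod.fst).Nodup := by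
    have := PySem.Dict.nodup_keys_ofList (ps := l)
    simpa [PySem.Dict.keys] using this
  rw [pv_fold_get _ _ _ hnd]
  cases hg : (PySem.Dict.ofList l).get? k with
  | none =>
    have hfind : (PySem.Dict.ofList l).items.find? (fun kv => kv.1 == k) = none := by
      apply List.find?_eq_none.mpr
      intro x hx hb
      have hx1 : x.1 = k := by simpa using hb
      have : k ∈ (PySem.Dict.ofList l).keys := by
        simp only [PySem.Dict.keys]
        exact List.mem_map.mpr ⟨x, hx, hx1⟩
      exact absurd hg (by simpa [PySem.Dict.get?_eq_none_iff_not_mem_keys] using this)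
    simp [hfind]
  | some v =>
    have hmem : (k, v) ∈ (PySem.Dict.ofList l).items :=
      PySem.Dict.mem_items_of_get?_eq_some _ hg
    rw [pv_find_of_mem hnd hmem]
    by_cases ha : pvAccept (k, v) = true
    · simp [ha]
    · simp [ha, PySem.Dict.get?_empty]

-- ===== VERDICT (by name: the statement is the Claim_ definition above) =====
set_option maxHeartbeats 2000000 in
theorem normalize_fingerprint_py_spec : Claim_equal_normalize_fingerprint_py := by
  intro fingerprint _
  unfold Spec_normalize_fingerprint_py normalize_fingerprint_py normalize_fingerprint_py_alt
  cases fingerprint with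
  | none => rfl
  | some l =>
    simp only [pv_acc_get, pv_keys_eq, PySem.Dict.contains_eq_isSome_get?,
      PySem.Dict.getD_eq_get?_getD, List.any, List.foldl, pv_accept_size, pv_accept_mtime,
      pv_accept_ctime, pv_accept_ino, pv_accept_dev]
    set d := PySem.Dict.ofList l
    cases h1 : d.get? "size" with
    | none => simp
    | some v1 =>
      by_cases hv1 : v1 < 0
      · simp [hv1, show ¬ (0:Int) ≤ v1 by omega]
      · simp only [if_neg hv1]
        cases h2 : d.get? "mtime_ns" with
        | none => simp [show (0:Int) ≤ v1 by omega]
        | some v2 =>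
          by_cases hv2 : v2 < 0
          · simp [hv2, show (0:Int) ≤ v1 by omega, show ¬ (0:Int) ≤ v2 by omega]
          · simp only [if_neg hv2]
            cases h3 : d.get? "ctime_ns" <;> cases h4 : d.get? "ino" <;> cases h5 : d.get? "dev" <;>
              simp [show (0:Int) ≤ v1 by omega, show (0:Int) ≤ v2 by omega] <;>
              split_ifs <;> first | rfl | omega
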